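-- pv_equiv track=rewrite | github.com/akam901205/prov-gigapath | test_all_caches_ranking.py | extract_test_samples
-- ===== SOURCE A (Python) =====
-- def extract_test_samples(features, labels, datasets):
--     """Extract BACH and BreakHis test samples"""
--     bach_benign_indices = []
--     bach_invasive_indices = []
--     breakhis_benign_indices = []
--     breakhis_malignant_indices = []
--
--     for i, (dataset, label) in enumerate(zip(datasets, labels)):
--         if dataset == 'bach':
--             if label == 'benign':
--                 bach_benign_indices.append(i)
--             elif label == 'invasive':
--                 bach_invasive_indices.append(i)
--         elif dataset == 'breakhis':
--             if label == 'benign':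
--                 breakhis_benign_indices.append(i)
--             elif label == 'malignant':
--                 breakhis_malignant_indices.append(i)
--
--     # Limit BACH samples to 100 each for consistency
--     bach_benign_indices = bach_benign_indices[:100]
--     bach_invasive_indices = bach_invasive_indices[:100]
--
--     return {
--         'bach_benign': bach_benign_indices,
--         'bach_invasive': bach_invasive_indices,
--         'breakhis_benign': breakhis_benign_indices,
--         'breakhis_malignant': breakhis_malignant_indices
--     }
-- ===== SOURCE B (Python) =====
-- def extract_test_samples(features, labels, datasets):
--     """Extract BACH and BreakHis test samples"""
--     pairs = list(enumerate(zip(datasets, labels)))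
--
--     def pick(ds, lb):
--         return [i for i, (d, l) in pairs if d == ds and l == lb]
--
--     return {
--         'bach_benign': pick('bach', 'benign')[:100],
--         'bach_invasive': pick('bach', 'invasive')[:100],
--         'breakhis_benign': pick('breakhis', 'benign'),
--         'breakhis_malignant': pick('breakhis', 'malignant'),
--     }
-- ===== Notes on version B (the rewrite author's own statement) =====
-- stated objective: simpler
-- what changed: Replaces the single loop with a nested if/elif branching tree feeding four mutable accumulator lists by four declarative filter comprehensions over enumerate(zip(datasets, labels)), one per (dataset, label) combination.
import Mathlib
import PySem

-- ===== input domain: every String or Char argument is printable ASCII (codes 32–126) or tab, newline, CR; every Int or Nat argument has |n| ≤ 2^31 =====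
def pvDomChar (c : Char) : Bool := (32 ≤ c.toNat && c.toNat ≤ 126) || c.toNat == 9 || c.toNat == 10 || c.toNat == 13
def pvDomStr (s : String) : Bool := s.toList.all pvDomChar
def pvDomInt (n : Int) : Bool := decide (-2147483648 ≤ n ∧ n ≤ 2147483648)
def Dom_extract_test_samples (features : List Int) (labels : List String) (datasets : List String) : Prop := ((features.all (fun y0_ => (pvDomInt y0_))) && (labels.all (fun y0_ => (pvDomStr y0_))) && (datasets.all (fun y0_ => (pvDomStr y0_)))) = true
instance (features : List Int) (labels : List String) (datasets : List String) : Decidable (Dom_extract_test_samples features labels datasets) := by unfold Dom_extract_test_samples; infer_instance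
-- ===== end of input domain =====

-- B replaces A's branching accumulator loop by four filter comprehensions (objective: simpler).

-- ===== PORT A =====
-- state = (bach_benign, bach_invasive, breakhis_benign, breakhis_malignant)
def pvStepA (s : List Int × List Int × List Int × List Int) (p : Int × String × String) :
    List Int × List Int × List Int × List Int :=
  if p.2.1 == "bach" then
    if p.2.2 == "benign" then (s.1 ++ [p.1], s.2.1, s.2.2.1, s.2.2.2)
    else if p.2.2 == "invasive" then (s.1, s.2.1 ++ [p.1], s.2.2.1, s.2.2.2)
    else s
  else if p.2.1 == "breakhis" then
    if p.2.2 == "benign" then (s.1, s.2.1, s.2.2.1 ++ [p.1], s.2.2.2)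
    else if p.2.2 == "malignant" then (s.1, s.2.1, s.2.2.1, s.2.2.2 ++ [p.1])
    else s
  else s

def extract_test_samples (features : List Int) (labels : List String) (datasets : List String) : List (String × List Int) :=
  let st := (PySem.List.enumerate (datasets.zip labels) 0).foldl pvStepA ([], [], [], [])
  [("bach_benign", PySem.List.slice st.1 none (some 100)),
   ("bach_invasive", PySem.List.slice st.2.1 none (some 100)),
   ("breakhis_benign", st.2.2.1),
   ("breakhis_malignant", st.2.2.2)]

-- ===== PORT B =====
-- pick(ds, lb) = [i for i, (d, l) in pairs if d == ds and l == lb]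
def pvPick (pairs : List (Int × String × String)) (ds lb : String) : List Int :=
  (pairs.filter (fun p => p.2.1 == ds && p.2.2 == lb)).map (·.1)

def extract_test_samples_alt (features : List Int) (labels : List String) (datasets : List String) : List (String × List Int) :=
  let pairs := PySem.List.enumerate (datasets.zip labels) 0
  [("bach_benign", PySem.List.slice (pvPick pairs "bach" "benign") none (some 100)),
   ("bach_invasive", PySem.List.slice (pvPick pairs "bach" "invasive") none (some 100)),
   ("breakhis_benign", pvPick pairs "breakhis" "benign"),
   ("breakhis_malignant", pvPick pairs "breakhis" "malignant")]

-- ===== PRECONDITION & SPEC =====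
def Spec_extract_test_samples (features : List Int) (labels : List String) (datasets : List String) (out : List (String × List Int)) : Prop := out = extract_test_samples_alt features labels datasets
instance (features : List Int) (labels : List String) (datasets : List String) (out : List (String × List Int)) : Decidable (Spec_extract_test_samples features labels datasets out) := by unfold Spec_extract_test_samples; infer_instance

-- ===== CLAIM (what is proved, stated in full; the proofs are below) =====
def Claim_equal_extract_test_samples : Prop := ∀ (features : List Int) (labels : List String) (datasets : List String), Dom_extract_test_samples features labels datasets → Spec_extract_test_samples features labels datasets (extract_test_samples features labels datasets)

-- ===== LEMMAS AND PROOFS =====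
theorem foldl_pvStepA_eq_pick (l : List (Int × String × String))
    (a b c d : List Int) :
    l.foldl pvStepA (a, b, c, d) =
      (a ++ pvPick l "bach" "benign", b ++ pvPick l "bach" "invasive",
       c ++ pvPick l "breakhis" "benign", d ++ pvPick l "breakhis" "malignant") := by
  induction l generalizing a b c d with
  | nil => simp [pvPick]
  | cons p l ih =>
    obtain ⟨i, ds, lb⟩ := p
    simp only [List.foldl_cons, pvStepA, pvPick, List.filter_cons]
    split_ifs with h1 h2 h3 h4 h5 h6 <;> simp_all [pvPick, ih]

theorem extract_test_samples_spec : Claim_equal_extract_test_samples := by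
  intro features labels datasets _
  show _ = _
  unfold extract_test_samples extract_test_samples_alt
  rw [foldl_pvStepA_eq_pick]
  simp

-- ===== VERDICT (by name: the statement is the Claim_ definition above) =====
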